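-- pv_equiv track=rewrite | github.com/yungommi/algorithm | baekjoon/2025/250417/17140.py | function
-- ===== SOURCE A (Python) =====
-- from collections import deque
--
-- def function(p,l):
--     arr = deque(l)
--     flip = False
--     for x in p:
--         if x =='R':
--             flip = not flip
--         else:
--             if not arr:
--                 return 'error'
--             elif flip:
--                 arr.pop()
--             else:
--                 arr.popleft()
--     if flip:
--         arr.reverse()
--     return ('['+','.join(map(str,arr))+']')
-- ===== SOURCE B (Python) =====
-- def function(p, l):
--     # one pass over p computing aggregate deletion counts, then a single slice
--     flip = False
--     left = 0
--     right = 0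
--     for x in p:
--         if x == 'R':
--             flip = not flip
--         elif flip:
--             right += 1
--         else:
--             left += 1
--     if len(l) < left + right:
--         return 'error'
--     window = l[left:len(l) - right]
--     if flip:
--         window = list(reversed(window))
--     return '[' + ','.join(map(str, window)) + ']'
-- ===== Notes on version B (the rewrite author's own statement) =====
-- stated objective: alternative
-- what changed: Instead of simulating every deletion on a deque, B scans the command string once counting left/right deletions under the current flip parity, then takes one slice of l (reversed if the final flip is set).
import Mathlib
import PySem

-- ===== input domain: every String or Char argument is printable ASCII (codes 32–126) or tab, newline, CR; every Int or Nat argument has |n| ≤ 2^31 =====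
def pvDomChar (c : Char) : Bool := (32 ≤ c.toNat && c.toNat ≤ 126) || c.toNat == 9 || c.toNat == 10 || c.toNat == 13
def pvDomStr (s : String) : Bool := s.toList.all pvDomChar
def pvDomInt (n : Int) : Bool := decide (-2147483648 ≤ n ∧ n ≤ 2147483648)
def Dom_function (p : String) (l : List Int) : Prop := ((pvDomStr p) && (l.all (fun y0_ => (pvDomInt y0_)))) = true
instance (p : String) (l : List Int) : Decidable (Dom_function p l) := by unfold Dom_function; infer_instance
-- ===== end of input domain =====

-- B replaces the per-character deque simulation by aggregate left/right deletion counts and one slice (objective: alternative decomposition, same cost).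


-- shared output formatting: '[' + ','.join(map(str, arr)) + ']' (same line in both Pythons)
def pvRender (arr : List Int) : String :=
  "[" ++ PySem.Str.join "," (arr.map PySem.Int.toStr) ++ "]"

-- ===== PORT A =====
-- the for-loop over p: state is (deque contents, flip); none = the 'return error' path
def functionLoop : List Char → List Int → Bool → Option (List Int × Bool)
  | [], arr, flip => some (arr, flip)
  | x :: xs, arr, flip =>
    if x = 'R' then functionLoop xs arr (!flip)
    else if arr = [] then none
    else if flip then functionLoop xs arr.dropLast flip   -- arr.pop()
    else functionLoop xs arr.tail flip                    -- arr.popleft()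

def function (p : String) (l : List Int) : String :=
  match functionLoop p.toList l false with
  | none => "error"
  | some (arr, flip) => pvRender (if flip then arr.reverse else arr)

-- ===== PORT B =====
def function_alt (p : String) (l : List Int) : String :=
  let s := p.toList.foldl
    (fun (s : Bool × Nat × Nat) x =>
      if x = 'R' then (!s.1, s.2.1, s.2.2)
      else if s.1 then (s.1, s.2.1, s.2.2 + 1)
      else (s.1, s.2.1 + 1, s.2.2)) (false, 0, 0)
  if l.length < s.2.1 + s.2.2 then "error"
  else
    let window := PySem.List.slice l (some (s.2.1 : Int)) (some ((l.length : Int) - (s.2.2 : Int)))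
    pvRender (if s.1 then window.reverse else window)

-- ===== PRECONDITION & SPEC =====
def Spec_function (p : String) (l : List Int) (out : String) : Prop := out = function_alt p l
instance (p : String) (l : List Int) (out : String) : Decidable (Spec_function p l out) := by unfold Spec_function; infer_instance

-- ===== CLAIM (what is proved, stated in full; the proofs are below) =====
def Claim_equal_function : Prop := ∀ (p : String) (l : List Int), Dom_function p l → Spec_function p l (function p l)

-- ===== LEMMAS AND PROOFS =====

-- recursive form of B's counting fold (proof helper)
def pvCount : List Char → Bool → Bool × Nat × Nat
  | [], f => (f, 0, 0)
  | x :: xs, f =>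
    if x = 'R' then pvCount xs (!f)
    else if f then
      let r := pvCount xs f; (r.1, r.2.1, r.2.2 + 1)
    else
      let r := pvCount xs f; (r.1, r.2.1 + 1, r.2.2)

lemma pvCount_cons_R (xs : List Char) (f : Bool) :
    pvCount ('R' :: xs) f = pvCount xs (!f) := by simp [pvCount]

lemma pvCount_cons_false {x : Char} (xs : List Char) (hR : x ≠ 'R') :
    pvCount (x :: xs) false
      = ((pvCount xs false).1, (pvCount xs false).2.1 + 1, (pvCount xs false).2.2) := by
  simp [pvCount, hR]

lemma pvCount_cons_true {x : Char} (xs : List Char) (hR : x ≠ 'R') :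
    pvCount (x :: xs) true
      = ((pvCount xs true).1, (pvCount xs true).2.1, (pvCount xs true).2.2 + 1) := by
  simp [pvCount, hR]

lemma pvFoldl_eq (xs : List Char) : ∀ (f : Bool) (a b : Nat),
    xs.foldl (fun (s : Bool × Nat × Nat) x =>
      if x = 'R' then (!s.1, s.2.1, s.2.2)
      else if s.1 then (s.1, s.2.1, s.2.2 + 1)
      else (s.1, s.2.1 + 1, s.2.2)) (f, a, b)
    = ((pvCount xs f).1, a + (pvCount xs f).2.1, b + (pvCount xs f).2.2) := by
  induction xs with
  | nil => intro f a b; simp [pvCount]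
  | cons x xs ih =>
    intro f a b
    by_cases hR : x = 'R'
    · simp [pvCount, hR, ih]
    · cases f
      · simp [pvCount, hR, ih, Nat.add_comm, Nat.add_left_comm]
      · simp [pvCount, hR, ih, Nat.add_comm, Nat.add_left_comm]

lemma pvLoop_eq (xs : List Char) : ∀ (arr : List Int) (f : Bool),
    functionLoop xs arr f =
      if arr.length < (pvCount xs f).2.1 + (pvCount xs f).2.2 then none
      else some ((arr.drop (pvCount xs f).2.1).take (arr.length - (pvCount xs f).2.1 - (pvCount xs f).2.2),
                 (pvCount xs f).1) := by
  induction xs with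
  | nil => intro arr f; simp [functionLoop, pvCount]
  | cons x xs ih =>
    intro arr f
    by_cases hR : x = 'R'
    · subst hR
      rw [show functionLoop ('R' :: xs) arr f = functionLoop xs arr (!f) by simp [functionLoop],
        pvCount_cons_R, ih]
    · cases f
      · -- popleft from the front
        rw [pvCount_cons_false xs hR]
        cases arr with
        | nil =>
          rw [show functionLoop (x :: xs) [] false = none by simp [functionLoop, hR],
            if_pos (by simp only [List.length_nil]; omega)]
        | cons y ys =>
          rw [show functionLoop (x :: xs) (y :: ys) false = functionLoop xs ys false by
              simp [functionLoop, hR], ih]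
          simp only [List.length_cons, List.drop_succ_cons]
          by_cases hc : ys.length < (pvCount xs false).2.1 + (pvCount xs false).2.2
          · rw [if_pos hc, if_pos (by omega)]
          · rw [if_neg hc, if_neg (by omega)]
            rw [show ys.length + 1 - ((pvCount xs false).2.1 + 1) - (pvCount xs false).2.2
                = ys.length - (pvCount xs false).2.1 - (pvCount xs false).2.2 from by omega]
      · -- pop from the back
        rw [pvCount_cons_true xs hR]
        cases arr with
        | nil =>
          rw [show functionLoop (x :: xs) [] true = none by simp [functionLoop, hR],
            if_pos (by simp only [List.length_nil]; omega)]
        | cons y ys =>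
          rw [show functionLoop (x :: xs) (y :: ys) true = functionLoop xs (y :: ys).dropLast true by
              simp [functionLoop, hR], ih]
          simp only [List.length_dropLast, List.length_cons, Nat.add_sub_cancel]
          by_cases hc : ys.length < (pvCount xs true).2.1 + (pvCount xs true).2.2
          · rw [if_pos hc, if_pos (by omega)]
          · rw [if_neg hc, if_neg (by omega)]
            rw [List.dropLast_eq_take, List.drop_take, List.take_take]
            simp only [List.length_cons, Nat.add_sub_cancel]
            rw [show min (ys.length - (pvCount xs true).2.1 - (pvCount xs true).2.2)
                  (ys.length - (pvCount xs true).2.1)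
                = ys.length + 1 - (pvCount xs true).2.1 - ((pvCount xs true).2.2 + 1) from by omega]

theorem function_spec_aux (p : String) (l : List Int) :
    function p l = function_alt p l := by
  unfold function function_alt
  rw [pvLoop_eq, pvFoldl_eq]
  simp only [Nat.zero_add]
  by_cases hc : l.length < (pvCount p.toList false).2.1 + (pvCount p.toList false).2.2
  · rw [if_pos hc, if_pos hc]
  · rw [if_neg hc, if_neg hc]
    have h1 : ((l.length : Int) - ((pvCount p.toList false).2.2 : Int)).toNat
        = l.length - (pvCount p.toList false).2.2 := by omega
    rw [PySem.List.slice_toNat l (Int.natCast_nonneg _) (by omega), h1, Int.toNat_natCast]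
    rw [show l.length - (pvCount p.toList false).2.2 - (pvCount p.toList false).2.1
        = l.length - (pvCount p.toList false).2.1 - (pvCount p.toList false).2.2 from by omega]

-- ===== VERDICT (by name: the statement is the Claim_ definition above) =====
theorem function_spec : Claim_equal_function := by
  intro p l _
  unfold Spec_function
  exact function_spec_aux p l
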